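-- pv_equiv track=rewrite | github.com/pallamidessi/OW-tech-test | usage.py | compute_cost_third_vowels
-- ===== SOURCE A (Python) =====
-- def compute_cost_third_vowels(text: str):
--     text_lowercase = text.lower()
--     vowels = {"a", "e", "i", "o", "u"}
--     total_cost = 0
--     for i, character in enumerate(text_lowercase):
--         if i % 3 == 0:
--             if character in vowels:
--                 total_cost += 30
--
--     return total_cost
-- ===== SOURCE B (Python) =====
-- def compute_cost_third_vowels(text: str):
--     return 30 * sum(c in "aeiou" for c in text.lower()[::3])
-- ===== Notes on version B (the rewrite author's own statement) =====
-- stated objective: simpler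
-- what changed: Replaces the enumerate loop with its index-modulo branch by slicing out the step-3 subsequence and counting vowels in it, returning 30 times the count.
import Mathlib
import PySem

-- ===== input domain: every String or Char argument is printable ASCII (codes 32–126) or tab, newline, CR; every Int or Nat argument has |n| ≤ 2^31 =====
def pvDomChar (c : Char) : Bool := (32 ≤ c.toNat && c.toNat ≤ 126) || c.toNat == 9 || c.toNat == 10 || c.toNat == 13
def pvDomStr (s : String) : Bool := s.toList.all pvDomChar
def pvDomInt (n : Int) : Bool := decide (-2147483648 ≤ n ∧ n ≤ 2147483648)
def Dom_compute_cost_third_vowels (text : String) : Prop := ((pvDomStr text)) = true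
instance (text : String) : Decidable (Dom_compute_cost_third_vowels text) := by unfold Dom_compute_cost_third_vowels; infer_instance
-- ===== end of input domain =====

-- B replaces the enumerate loop with its index-modulo branch by slicing out the
-- step-3 subsequence and counting vowels in it (simpler decomposition, same cost).

-- ===== PORT A =====
def compute_cost_third_vowels (text : String) : Int :=
  let text_lowercase := PySem.Str.lower text
  let vowels : PySem.Set Char := PySem.Set.ofList ['a', 'e', 'i', 'o', 'u']
  (PySem.List.enumerate text_lowercase.toList 0).foldl
    (fun total_cost p =>
      if PySem.Int.mod p.1 3 = 0 then
        if vowels.contains p.2 then total_cost + 30 else total_cost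
      else total_cost) 0

-- ===== PORT B =====
-- text.lower()[::3] : every third character, starting at index 0
def pvEveryThird : List Char → List Char
  | [] => []
  | c :: rest => c :: pvEveryThird (rest.drop 2)
termination_by cs => cs.length
decreasing_by simp [List.length_drop]

def compute_cost_third_vowels_alt (text : String) : Int :=
  30 * ((pvEveryThird (PySem.Str.lower text).toList).countP
          (fun c => c ∈ "aeiou".toList) : Int)

-- ===== PRECONDITION & SPEC =====
def Spec_compute_cost_third_vowels (text : String) (out : Int) : Prop := out = compute_cost_third_vowels_alt text
instance (text : String) (out : Int) : Decidable (Spec_compute_cost_third_vowels text out) := by unfold Spec_compute_cost_third_vowels; infer_instance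

-- ===== CLAIM (what is proved, stated in full; the proofs are below) =====
def Claim_equal_compute_cost_third_vowels : Prop := ∀ (text : String), Dom_compute_cost_third_vowels text → Spec_compute_cost_third_vowels text (compute_cost_third_vowels text)

-- ===== LEMMAS AND PROOFS =====

def pvStep (total_cost : Int) (p : Int × Char) : Int :=
  if PySem.Int.mod p.1 3 = 0 then
    if (PySem.Set.ofList ['a', 'e', 'i', 'o', 'u'] : PySem.Set Char).contains p.2
    then total_cost + 30 else total_cost
  else total_cost

lemma pvStep_vowel_iff (c : Char) :
    (PySem.Set.ofList ['a', 'e', 'i', 'o', 'u'] : PySem.Set Char).contains c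
      = decide (c ∈ "aeiou".toList) := by
  simp [PySem.Set.contains_eq_listContains, PySem.Set.ofList]

lemma pvEveryThird_nil : pvEveryThird [] = [] := by
  rw [pvEveryThird.eq_1]

lemma pvEveryThird_cons (c : Char) (rest : List Char) :
    pvEveryThird (c :: rest) = c :: pvEveryThird (rest.drop 2) := by
  rw [pvEveryThird.eq_2]

-- the key three-phase loop invariant
lemma pvMain (cs : List Char) : ∀ (s acc : Int),
    (PySem.Int.mod s 3 = 0 →
      (PySem.List.enumerate cs s).foldl pvStep acc
        = acc + 30 * ((pvEveryThird cs).countP (fun c => c ∈ "aeiou".toList) : Int)) ∧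
    (PySem.Int.mod s 3 = 1 →
      (PySem.List.enumerate cs s).foldl pvStep acc
        = acc + 30 * ((pvEveryThird (cs.drop 2)).countP (fun c => c ∈ "aeiou".toList) : Int)) ∧
    (PySem.Int.mod s 3 = 2 →
      (PySem.List.enumerate cs s).foldl pvStep acc
        = acc + 30 * ((pvEveryThird (cs.drop 1)).countP (fun c => c ∈ "aeiou".toList) : Int)) := by
  induction cs with
  | nil =>
    intro s acc
    refine ⟨?_, ?_, ?_⟩ <;> intro _ <;>
      simp [PySem.List.enumerate_nil, pvEveryThird_nil]
  | cons c rest ih =>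
    intro s acc
    have hmod : PySem.Int.mod (s + 1) 3 = PySem.Int.mod (PySem.Int.mod s 3 + 1) 3 := by
      simp [PySem.Int.mod]
    refine ⟨?_, ?_, ?_⟩ <;> intro hs
    · -- index ≡ 0: this character counts
      have h1 : PySem.Int.mod (s + 1) 3 = 1 := by rw [hmod, hs]; decide
      have h := (ih (s + 1) (pvStep acc (s, c))).2.1 h1
      rw [PySem.List.enumerate_cons, List.foldl_cons, h,
        pvEveryThird_cons, List.countP_cons]
      simp only [pvStep]
      rw [if_pos hs, pvStep_vowel_iff]
      split_ifs <;> push_cast <;> ring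
    · -- index ≡ 1: skipped; (c :: rest)[2:] = rest[1:]
      have h2 : PySem.Int.mod (s + 1) 3 = 2 := by rw [hmod, hs]; decide
      have h := (ih (s + 1) (pvStep acc (s, c))).2.2 h2
      have hne : ¬ (PySem.Int.mod s 3 = 0) := by rw [hs]; decide
      have hstep : pvStep acc (s, c) = acc := by simp only [pvStep, if_neg hne]
      rw [PySem.List.enumerate_cons, List.foldl_cons, hstep]
      rw [hstep] at h
      exact h
    · -- index ≡ 2: skipped; (c :: rest)[1:] = rest
      have h0 : PySem.Int.mod (s + 1) 3 = 0 := by rw [hmod, hs]; decide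
      have h := (ih (s + 1) (pvStep acc (s, c))).1 h0
      have hne : ¬ (PySem.Int.mod s 3 = 0) := by rw [hs]; decide
      have hstep : pvStep acc (s, c) = acc := by simp only [pvStep, if_neg hne]
      rw [PySem.List.enumerate_cons, List.foldl_cons, hstep]
      rw [hstep] at h
      exact h

-- ===== VERDICT (by name: the statement is the Claim_ definition above) =====
theorem compute_cost_third_vowels_spec : Claim_equal_compute_cost_third_vowels := by
  intro text _
  unfold Spec_compute_cost_third_vowels
  show (PySem.List.enumerate (PySem.Str.lower text).toList 0).foldl pvStep 0
      = compute_cost_third_vowels_alt text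
  rw [(pvMain (PySem.Str.lower text).toList 0 0).1 (by decide)]
  rw [compute_cost_third_vowels_alt]
  ring
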